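-- pv_equiv track=rewrite | github.com/LLNL/shroud | shroud/statements.py | compute_all_permutations
-- ===== SOURCE A (Python) =====
-- def compute_all_permutations(key):
--     """Expand parts which have multiple values
--
--     Ex: parts =
--       [['c'], ['in', 'out', 'inout'], ['native'], ['*'], ['cfi']]
--     Three entries will be returned:
--       ['c', 'in', 'native', '*', 'cfi']
--       ['c', 'out', 'native', '*', 'cfi']
--       ['c', 'inout', 'native', '*', 'cfi']
--     """
--     steps = key.split("_")
--     substeps = []
--     for part in steps:
--         subparts = part.split("/")
--         substeps.append(subparts)
--
--     expanded = []
--     compute_stmt_permutations(expanded, substeps)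
--     return expanded
--
-- def compute_stmt_permutations(out, parts):
--     """Recursively expand permutations
--
--     ex: f_function_string_scalar/*/&_cfi_copy
--
--     Parameters
--     ----------
--     out : list
--         Results are appended to the list.
--     parts :
--     """
--     tmp = []
--     for i, part in enumerate(parts):
--         if isinstance(part, list):
--             if len(part) == 1:
--                 tmp.append(part[0])
--             else:
--                 for expand in part:
--                     compute_stmt_permutations(
--                         out, tmp + [expand] + parts[i+1:])
--                 break
--         else:
--             tmp.append(part)
--     else:
--         out.append(tmp)
-- ===== SOURCE B (Python) =====
-- import itertools
--
-- def compute_all_permutations(key):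
--     substeps = [part.split("/") for part in key.split("_")]
--     return [list(combo) for combo in itertools.product(*substeps)]
-- ===== Notes on version B (the rewrite author's own statement) =====
-- stated objective: idiomatic
-- what changed: Replaced the hand-written recursive permutation expander (mutable out list, tmp accumulator, break/else loop) with a list comprehension over itertools.product of the split parts.
import Mathlib
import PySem

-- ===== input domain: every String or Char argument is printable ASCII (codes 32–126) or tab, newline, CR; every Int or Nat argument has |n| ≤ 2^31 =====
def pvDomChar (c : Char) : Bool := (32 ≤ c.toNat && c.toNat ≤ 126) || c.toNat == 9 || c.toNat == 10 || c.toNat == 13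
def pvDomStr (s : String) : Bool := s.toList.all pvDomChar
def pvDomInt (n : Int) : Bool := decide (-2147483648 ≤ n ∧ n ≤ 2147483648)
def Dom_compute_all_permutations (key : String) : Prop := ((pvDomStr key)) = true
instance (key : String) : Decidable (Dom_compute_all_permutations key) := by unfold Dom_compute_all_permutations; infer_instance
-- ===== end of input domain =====

-- B replaces A's hand-written recursive permutation expander with itertools.product
-- over the split parts (idiomatic; same asymptotic cost).

-- ===== PORT A =====
-- A's helper works on a heterogeneous list (strings or lists of strings); PyPart models that.
inductive PyPart where
  | str : String → PyPart
  | lst : List String → PyPart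
deriving DecidableEq, Repr

def countLst : List PyPart → Nat
  | [] => 0
  | .str _ :: rest => countLst rest
  | .lst _ :: rest => countLst rest + 1

-- termination helper for the mutual recursion below (cited by its decreasing_by)
theorem countLst_map_str_append (tmp : List String) (rest : List PyPart) :
    countLst (tmp.map PyPart.str ++ rest) = countLst rest := by
  induction tmp with
  | nil => rfl
  | cons a t ih => simpa [countLst] using ih

-- compute_stmt_permutations: `cspGo` is the for-loop over `parts` with accumulator `tmp`
-- (the for-else appends tmp on normal exit); `cspMany` is the inner `for expand in part`
-- loop that recurses on tmp + [expand] + parts[i+1:] and then breaks.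
mutual
def cspGo (out : List (List String)) (tmp : List String) (parts : List PyPart) :
    List (List String) :=
  match parts with
  | [] => out ++ [tmp]
  | .str s :: rest => cspGo out (tmp ++ [s]) rest
  | .lst l :: rest =>
    if _h : l.length = 1 then
      cspGo out (tmp ++ [l[0]!]) rest
    else
      cspMany out l tmp rest
  termination_by (countLst parts, parts.length, 0)
  decreasing_by all_goals simp [countLst, countLst_map_str_append, Prod.lex_def] <;> omega

def cspMany (out : List (List String)) (l : List String) (tmp : List String)
    (rest : List PyPart) : List (List String) :=
  match l with
  | [] => out
  | e :: es =>
      cspMany (cspGo out [] (tmp.map PyPart.str ++ [PyPart.str e] ++ rest)) es tmp rest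
  termination_by (countLst rest + 1, 0, l.length)
  decreasing_by all_goals simp [countLst, countLst_map_str_append, Prod.lex_def] <;> omega
end

def compute_all_permutations (key : String) : List (List String) :=
  -- separators "_" and "/" are nonempty, so split? is always `some`; getD [] is unreachable
  cspGo [] [] (((PySem.Str.split? key "_").getD []).map
    (fun part => PyPart.lst ((PySem.Str.split? part "/").getD [])))

-- ===== PORT B =====
-- itertools.product(*substeps): leftmost factor varies slowest, each tuple as a list.
def cartProd : List (List String) → List (List String)
  | [] => [[]]
  | l :: ls => l.flatMap (fun x => (cartProd ls).map (fun p => x :: p))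

def compute_all_permutations_alt (key : String) : List (List String) :=
  cartProd (((PySem.Str.split? key "_").getD []).map
    (fun part => (PySem.Str.split? part "/").getD []))

-- ===== PRECONDITION & SPEC =====
def Spec_compute_all_permutations (key : String) (out : List (List String)) : Prop := out = compute_all_permutations_alt key
instance (key : String) (out : List (List String)) : Decidable (Spec_compute_all_permutations key out) := by unfold Spec_compute_all_permutations; infer_instance

-- ===== CLAIM (what is proved, stated in full; the proofs are below) =====
def Claim_equal_compute_all_permutations : Prop := ∀ (key : String), Dom_compute_all_permutations key → Spec_compute_all_permutations key (compute_all_permutations key)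

-- ===== LEMMAS AND PROOFS =====

-- a prefix of string parts is just absorbed into tmp
theorem cspGo_str_prefix (ss : List String) (out : List (List String))
    (tmp : List String) (parts : List PyPart) :
    cspGo out tmp (ss.map PyPart.str ++ parts) = cspGo out (tmp ++ ss) parts := by
  induction ss generalizing tmp with
  | nil => simp
  | cons s ss ih =>
      rw [List.map_cons, List.cons_append, cspGo, ih]
      simp

-- main invariant: the helper on a list of list-parts appends the Cartesian product
theorem cspGo_eq_cartProd (ls : List (List String)) (out : List (List String))
    (tmp : List String) :
    cspGo out tmp (ls.map PyPart.lst) = out ++ (cartProd ls).map (fun p => tmp ++ p) := by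
  induction ls generalizing out tmp with
  | nil => simp [cspGo, cartProd]
  | cons l ls ih =>
      rw [List.map_cons, cspGo]
      by_cases h : l.length = 1
      · obtain ⟨x, rfl⟩ : ∃ x, l = [x] := by
          match l, h with | [x], _ => exact ⟨x, rfl⟩
        simp only [dif_pos h, ih]
        simp [cartProd]
      · rw [dif_neg h]
        have many : ∀ (l' : List String) (out : List (List String)),
            cspMany out l' tmp (ls.map PyPart.lst) =
              out ++ l'.flatMap (fun e => (cartProd ls).map (fun p => tmp ++ e :: p)) := by
          intro l'
          induction l' with
          | nil => intro out; simp [cspMany]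
          | cons e es ihe =>
              intro out
              rw [cspMany, ihe]
              have heq : tmp.map PyPart.str ++ [PyPart.str e] ++ ls.map PyPart.lst
                  = (tmp ++ [e]).map PyPart.str ++ ls.map PyPart.lst := by simp
              rw [heq, cspGo_str_prefix, ih]
              simp [List.flatMap_cons]
        rw [many l out]
        simp [cartProd, List.map_flatMap, Function.comp_def]

-- ===== VERDICT (by name: the statement is the Claim_ definition above) =====
theorem compute_all_permutations_spec : Claim_equal_compute_all_permutations := by
  intro key _
  unfold Spec_compute_all_permutations compute_all_permutations compute_all_permutations_alt
  have h := cspGo_eq_cartProd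
    (((PySem.Str.split? key "_").getD []).map (fun part => (PySem.Str.split? part "/").getD []))
    [] []
  simp only [List.map_map] at h
  simpa [Function.comp_def] using h
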